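-- pv_equiv track=rewrite | github.com/nkahrs/lewin-rhythms | class_equiv.py | combine_listdict_equiv
-- ===== SOURCE A (Python) =====
-- import copy
--
-- def combine_listdict_equiv(thedict, modulus):
--     newdict = {}
--     for i in thedict.keys():
--         im = i % modulus
--         if im in newdict.keys():
--             newdict[im] += thedict[i]
--         else:
--             newdict[im] = copy.deepcopy(thedict[i])
--     return newdict
-- ===== SOURCE B (Python) =====
-- import copy
--
-- def combine_listdict_equiv(thedict, modulus):
--     # two passes: group the values by key residue, then reduce each group
--     groups = {}
--     for k, v in thedict.items():
--         groups.setdefault(k % modulus, []).append(v)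
--     newdict = {}
--     for r, vals in groups.items():
--         acc = copy.deepcopy(vals[0])
--         for v in vals[1:]:
--             acc += v
--         newdict[r] = acc
--     return newdict
-- ===== Notes on version B (the rewrite author's own statement) =====
-- stated objective: alternative
-- what changed: B splits A's single branched pass into two passes: first group the values by key residue with setdefault/append, then reduce each group left-to-right (deep-copying only the group's first value), instead of branching on membership and updating the accumulator dict in one loop. Pre_ excludes modulus=0 (ZeroDivisionError) and duplicate-key association lists, which a Python dict cannot represent.
import Mathlib
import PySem

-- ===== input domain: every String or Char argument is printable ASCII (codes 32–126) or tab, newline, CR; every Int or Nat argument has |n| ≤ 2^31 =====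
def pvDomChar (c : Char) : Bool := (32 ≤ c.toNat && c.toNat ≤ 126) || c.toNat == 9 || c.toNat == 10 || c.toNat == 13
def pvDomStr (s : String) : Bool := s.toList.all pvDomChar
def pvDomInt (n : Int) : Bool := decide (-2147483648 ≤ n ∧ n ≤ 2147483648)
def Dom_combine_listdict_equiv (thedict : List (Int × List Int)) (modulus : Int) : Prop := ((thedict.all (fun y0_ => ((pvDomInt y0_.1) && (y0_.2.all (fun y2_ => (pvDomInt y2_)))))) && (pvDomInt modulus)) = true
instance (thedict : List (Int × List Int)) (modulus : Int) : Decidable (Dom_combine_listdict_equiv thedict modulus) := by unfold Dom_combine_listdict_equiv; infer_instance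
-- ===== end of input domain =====

-- B replaces A's single branched accumulation pass by a group-by-residue pass followed by a per-group reduction pass (alternative decomposition, same cost); equivalence is about the return value.


-- ===== PORT A =====
-- for i in thedict.keys(): im = i % modulus; branch on membership, extend or copy.
-- thedict[i] with i drawn from thedict.keys() always hits, ported as getD with default [].
def combine_listdict_equiv (thedict : List (Int × List Int)) (modulus : Int) : List (Int × List Int) :=
  let td : PySem.Dict Int (List Int) := PySem.Dict.mk thedict
  ((thedict.map (·.1)).foldl (fun nd i =>
      let im := PySem.Int.mod i modulus
      if nd.contains im then
        nd.modify im [] (· ++ td.getD i [])   -- newdict[im] += thedict[i]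
      else
        nd.insert im (td.getD i [])           -- newdict[im] = deepcopy(thedict[i])
    ) PySem.Dict.empty).items

-- ===== PORT B =====
-- acc = deepcopy(vals[0]); for v in vals[1:]: acc += v   ([] case unreachable: groups are nonempty)
def pvReduceGroup (vals : List (List Int)) : List Int :=
  match vals with
  | [] => []
  | v :: rest => rest.foldl (· ++ ·) v

def combine_listdict_equiv_alt (thedict : List (Int × List Int)) (modulus : Int) : List (Int × List Int) :=
  let groups := thedict.foldl
      (fun g p => g.modify (PySem.Int.mod p.1 modulus) [] (· ++ [p.2]))  -- groups.setdefault(k % modulus, []).append(v)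
      (PySem.Dict.empty : PySem.Dict Int (List (List Int)))
  (groups.items.foldl (fun nd rv => nd.insert rv.1 (pvReduceGroup rv.2))
      (PySem.Dict.empty : PySem.Dict Int (List Int))).items

-- ===== PRECONDITION & SPEC =====
-- Pre_ excludes modulus = 0, where Python A raises ZeroDivisionError, and association lists with
-- duplicate keys, which a Python dict cannot represent (the encoding's first-match lookup is accidental there).
def Pre_combine_listdict_equiv (thedict : List (Int × List Int)) (modulus : Int) : Prop :=
  (thedict.map Prod.fst).Nodup ∧ modulus ≠ 0
instance (thedict : List (Int × List Int)) (modulus : Int) : Decidable (Pre_combine_listdict_equiv thedict modulus) := by unfold Pre_combine_listdict_equiv; infer_instance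
def pvWitness_combine_listdict_equiv : (List (Int × List Int)) × Int := ([(1, [1, 2]), (3, [3]), (6, [4])], 5)

def Spec_combine_listdict_equiv (thedict : List (Int × List Int)) (modulus : Int) (out : List (Int × List Int)) : Prop := out = combine_listdict_equiv_alt thedict modulus
instance (thedict : List (Int × List Int)) (modulus : Int) (out : List (Int × List Int)) : Decidable (Spec_combine_listdict_equiv thedict modulus out) := by unfold Spec_combine_listdict_equiv; infer_instance

-- ===== CLAIM (what is proved, stated in full; the proofs are below) =====
def Claim_equal_combine_listdict_equiv : Prop := ∀ (thedict : List (Int × List Int)) (modulus : Int), Dom_combine_listdict_equiv thedict modulus → Pre_combine_listdict_equiv thedict modulus → Spec_combine_listdict_equiv thedict modulus (combine_listdict_equiv thedict modulus)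

-- ===== LEMMAS AND PROOFS =====

-- appending one more value to a nonempty group extends the reduced list
theorem pvReduceGroup_append (v : List (List Int)) (x : List Int) (h : v ≠ []) :
    pvReduceGroup (v ++ [x]) = pvReduceGroup v ++ x := by
  cases v with
  | nil => exact absurd rfl h
  | cons h t => simp [pvReduceGroup, List.foldl_append]

-- every group stays nonempty through one setdefault/append step
theorem pv_groups_ne (r : Int) (x : List Int) (g : PySem.Dict Int (List (List Int)))
    (hne : ∀ rv ∈ g.items, rv.2 ≠ []) :
    ∀ rv ∈ (g.modify r [] (· ++ [x])).items, rv.2 ≠ [] := by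
  intro rv hrv
  simp only [PySem.Dict.modify, PySem.Dict.insert] at hrv
  split at hrv
  · obtain ⟨q, hq, hmap⟩ := List.mem_map.mp hrv
    by_cases hqr : (q.1 == r) = true
    · simp only [hqr, if_true] at hmap
      subst hmap; simp
    · simp only [hqr] at hmap
      subst hmap; exact hne _ hq
  · rcases List.mem_append.mp hrv with h' | h'
    · exact hne _ h'
    · simp only [List.mem_singleton] at h'
      subst h'; simp

-- Main invariant: A's accumulator dict is, entrywise, the reduction of B's grouping dict.
theorem pv_main (m : Int) (l : List (Int × List Int)) :
    ∀ (g : PySem.Dict Int (List (List Int))),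
    (∀ rv ∈ g.items, rv.2 ≠ []) →
    (l.foldl (fun nd p =>
        let im := PySem.Int.mod p.1 m
        if nd.contains im then nd.modify im [] (· ++ p.2) else nd.insert im p.2)
      (PySem.Dict.mk (g.items.map (fun rv => (rv.1, pvReduceGroup rv.2))))).items
    = ((l.foldl (fun g p => g.modify (PySem.Int.mod p.1 m) [] (· ++ [p.2])) g).items).map
        (fun rv => (rv.1, pvReduceGroup rv.2)) := by
  induction l with
  | nil => intro g _; rfl
  | cons p l ih =>
    intro g hne
    simp only [List.foldl_cons]
    set im := PySem.Int.mod p.1 m with him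
    have hc : (PySem.Dict.mk (g.items.map (fun rv => (rv.1, pvReduceGroup rv.2)))).contains im
        = g.contains im := by
      simp [PySem.Dict.contains, List.any_map, Function.comp_def]
    by_cases h : g.contains im = true
    · -- existing residue: both update the entry in place
      have hstate :
          ((PySem.Dict.mk (g.items.map (fun rv => (rv.1, pvReduceGroup rv.2)))).modify im [] (· ++ p.2))
          = PySem.Dict.mk (((g.modify im [] (· ++ [p.2])).items).map (fun rv => (rv.1, pvReduceGroup rv.2))) := by
        have hfind : ∀ (d : List ((Int × List (List Int)))),
            List.find? (fun q => q.1 == im) (d.map (fun rv => (rv.1, pvReduceGroup rv.2)))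
            = Option.map (fun rv => (rv.1, pvReduceGroup rv.2)) (List.find? (fun q => q.1 == im) d) := by
          intro d
          rw [List.find?_map]
          rfl
        simp only [PySem.Dict.modify, PySem.Dict.insert, hc, h, if_pos,
          PySem.Dict.getD, PySem.Dict.get?, hfind]
        cases hf : List.find? (fun q => q.1 == im) g.items with
        | none =>
          exfalso
          obtain ⟨q, hq, hk⟩ := List.any_eq_true.mp h
          have := List.find?_eq_none.mp hf _ hq
          simp_all
        | some q =>
          have hqne : q.2 ≠ [] := hne _ (List.mem_of_find?_eq_some hf)
          simp only [Option.map_some, Option.getD_some, List.map_map]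
          congr 1
          apply List.map_congr_left
          intro a _
          by_cases ha : (a.1 == im) = true <;>
            simp [ha, Function.comp, pvReduceGroup_append _ _ hqne]
      simp only [hc, h, if_true, hstate]
      exact ih _ (pv_groups_ne im p.2 g hne)
    · -- new residue: both append a fresh entry
      have h' : g.contains im = false := by simpa using h
      have hstate :
          ((PySem.Dict.mk (g.items.map (fun rv => (rv.1, pvReduceGroup rv.2)))).insert im p.2)
          = PySem.Dict.mk (((g.modify im [] (· ++ [p.2])).items).map (fun rv => (rv.1, pvReduceGroup rv.2))) := by
        have hgd : g.getD im [] = [] := PySem.Dict.getD_of_not_contains g [] h'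
        have hcm : (PySem.Dict.mk (g.items.map (fun rv => (rv.1, pvReduceGroup rv.2)))).contains im = false := by
          rw [hc]; exact h'
        simp only [PySem.Dict.modify, PySem.Dict.insert, hcm, h', hgd, Bool.false_eq_true,
          if_false, List.map_append]
        simp [pvReduceGroup]
      simp only [hc, h', Bool.false_eq_true, if_false, hstate]
      exact ih _ (pv_groups_ne im p.2 g hne)

-- ===== VERDICT (by name: the statement is the Claim_ definition above) =====
theorem combine_listdict_equiv_spec : Claim_equal_combine_listdict_equiv := by
  intro thedict modulus _ hpre
  obtain ⟨hnd, _⟩ := hpre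
  unfold Spec_combine_listdict_equiv combine_listdict_equiv combine_listdict_equiv_alt
  have hkeys : (PySem.Dict.mk thedict : PySem.Dict Int (List Int)).keys.Nodup := by
    simpa [PySem.Dict.keys] using hnd
  show ((thedict.map (fun x => x.1)).foldl (fun nd i =>
          let im := PySem.Int.mod i modulus
          if nd.contains im then nd.modify im [] (· ++ (PySem.Dict.mk thedict).getD i [])
          else nd.insert im ((PySem.Dict.mk thedict).getD i []))
        (PySem.Dict.mk ((((PySem.Dict.empty : PySem.Dict Int (List (List Int)))).items).map
          (fun rv => (rv.1, pvReduceGroup rv.2))))).items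
      = (((thedict.foldl (fun g p => g.modify (PySem.Int.mod p.1 modulus) [] (· ++ [p.2]))
            (PySem.Dict.empty : PySem.Dict Int (List (List Int)))).items).foldl
          (fun nd rv => nd.insert rv.1 (pvReduceGroup rv.2)) PySem.Dict.empty).items
  -- A's loop over keys with lookups = the same loop over the items
  rw [List.foldl_map]
  rw [PySem.List.foldl_congr_mem thedict _
      (fun nd p =>
        let im := PySem.Int.mod p.1 modulus
        if nd.contains im then nd.modify im [] (· ++ p.2) else nd.insert im p.2)
      _
      (by
        intro acc p hp
        have hget : (PySem.Dict.mk thedict : PySem.Dict Int (List Int)).getD p.1 [] = p.2 :=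
          PySem.Dict.getD_of_mem_items _ (by simpa using hp) hkeys []
        simp [hget])]
  -- A's loop = the reduction of B's grouping dict (invariant, starting from empty)
  rw [pv_main modulus thedict PySem.Dict.empty (by intro rv hrv; simp [PySem.Dict.empty] at hrv)]
  -- B's second loop over the groups' distinct residues appends entry by entry
  have hgnd : ((thedict.foldl (fun g p => g.modify (PySem.Int.mod p.1 modulus) [] (· ++ [p.2]))
      (PySem.Dict.empty : PySem.Dict Int (List (List Int))))).keys.Nodup :=
    PySem.Dict.nodup_keys_foldl_modify_key thedict (fun p => PySem.Int.mod p.1 modulus) []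
      (fun _ p v => v ++ [p.2]) PySem.Dict.empty (by simp [PySem.Dict.empty, PySem.Dict.keys])
  have hfresh := PySem.Dict.items_foldl_insert_fresh
      ((thedict.foldl (fun g p => g.modify (PySem.Int.mod p.1 modulus) [] (· ++ [p.2]))
        (PySem.Dict.empty : PySem.Dict Int (List (List Int)))).items)
      (fun rv => rv.1) (fun rv => pvReduceGroup rv.2)
      PySem.Dict.empty (by intro a _; simp [PySem.Dict.empty, PySem.Dict.contains])
      (by simpa [PySem.Dict.keys] using hgnd)
  rw [hfresh]
  rfl
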